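-- pv_equiv track=rewrite | github.com/Ashitav2000/Calculation | Test-2.py | calculate_avg_steps
-- ===== SOURCE A (Python) =====
-- def calculate_avg_steps(steps):
--     avg_no_of_steps = [0] * 12
--     no_of_days_month = [31, 28, 31, 30, 31, 30, 31, 31, 30, 31, 30, 31]
--
--     # Calculating total steps for each month
--     for i, count in enumerate(steps):
--         month_value = i % 12
--         avg_no_of_steps[month_value] += count
--     # Calculating the average steps for each month
--     for i in range(12):
--         avg_no_of_steps[i] //= no_of_days_month[i]
--
--     return avg_no_of_steps
-- ===== SOURCE B (Python) =====
-- def calculate_avg_steps(steps):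
--     no_of_days_month = [31, 28, 31, 30, 31, 30, 31, 31, 30, 31, 30, 31]
--
--     totals = [0] * 12
--     start = 0
--     while start < len(steps):
--         chunk = steps[start:start + 12]
--         totals = [totals[i] + (chunk[i] if i < len(chunk) else 0) for i in range(12)]
--         start += 12
--
--     return [t // d for t, d in zip(totals, no_of_days_month)]
-- ===== Notes on version B (the rewrite author's own statement) =====
-- stated objective: alternative
-- what changed: Replaces the index-mod-12 scatter pass over all elements by a loop over 12-element (year) chunks that adds each chunk vectorwise into a 12-vector of month totals, then divides by days via zip instead of an in-place range loop.
import Mathlib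
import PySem

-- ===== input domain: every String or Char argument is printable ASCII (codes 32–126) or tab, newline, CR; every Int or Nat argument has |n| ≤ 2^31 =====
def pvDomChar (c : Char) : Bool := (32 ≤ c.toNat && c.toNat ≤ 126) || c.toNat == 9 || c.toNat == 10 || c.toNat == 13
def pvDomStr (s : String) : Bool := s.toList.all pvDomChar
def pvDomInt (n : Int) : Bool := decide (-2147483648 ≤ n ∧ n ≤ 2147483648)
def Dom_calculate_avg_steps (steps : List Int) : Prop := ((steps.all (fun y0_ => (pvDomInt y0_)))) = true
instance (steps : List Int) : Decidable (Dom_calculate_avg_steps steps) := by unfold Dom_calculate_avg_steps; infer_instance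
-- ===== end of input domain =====

-- B replaces A's index-mod-12 scatter pass by a loop over 12-element chunks added vectorwise into the totals (objective: alternative decomposition, same cost).

-- ===== PORT A =====
-- for i, count in enumerate(steps): avg[i % 12] += count  — state is (accumulator list, running index)
def calculate_avg_steps (steps : List Int) : List Int :=
  let no_of_days_month : List Int := [31, 28, 31, 30, 31, 30, 31, 31, 30, 31, 30, 31]
  let st := steps.foldl
    (fun (st : List Int × Nat) count =>
      let month_value := st.2 % 12
      (st.1.set month_value (st.1.getD month_value 0 + count), st.2 + 1))
    (List.replicate 12 (0 : Int), 0)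
  -- for i in range(12): avg[i] //= no_of_days_month[i]
  (List.range 12).foldl
    (fun acc i => acc.set i (PySem.Int.floordiv (acc.getD i 0) (no_of_days_month.getD i 0)))
    st.1

-- ===== PORT B =====
-- while start < len(steps): add the chunk steps[start:start+12] into the 12 totals, then start += 12
def chunk_loop (steps totals : List Int) (start : Nat) : List Int :=
  if _h : start < steps.length then
    let chunk := PySem.List.slice steps (some (start : Int)) (some ((start : Int) + 12))
    chunk_loop steps
      ((List.range 12).map (fun i => totals.getD i 0 + (if i < chunk.length then chunk.getD i 0 else 0)))
      (start + 12)
  else totals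
termination_by steps.length - start
decreasing_by omega

def calculate_avg_steps_alt (steps : List Int) : List Int :=
  let no_of_days_month : List Int := [31, 28, 31, 30, 31, 30, 31, 31, 30, 31, 30, 31]
  let totals := chunk_loop steps (List.replicate 12 (0 : Int)) 0
  List.zipWith (fun t d => PySem.Int.floordiv t d) totals no_of_days_month

-- ===== PRECONDITION & SPEC =====
def Spec_calculate_avg_steps (steps : List Int) (out : List Int) : Prop := out = calculate_avg_steps_alt steps
instance (steps : List Int) (out : List Int) : Decidable (Spec_calculate_avg_steps steps out) := by unfold Spec_calculate_avg_steps; infer_instance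

-- ===== CLAIM (what is proved, stated in full; the proofs are below) =====
def Claim_equal_calculate_avg_steps : Prop := ∀ (steps : List Int), Dom_calculate_avg_steps steps → Spec_calculate_avg_steps steps (calculate_avg_steps steps)

-- ===== LEMMAS AND PROOFS =====

-- Tsum i m s = sum of elements of s whose global index (starting at i) is ≡ m (mod 12)
def Tsum (i m : Nat) : List Int → Int
  | [] => 0
  | c :: cs => (if i % 12 = m then c else 0) + Tsum (i + 1) m cs

theorem Tsum_append (m : Nat) (xs ys : List Int) : ∀ i,
    Tsum i m (xs ++ ys) = Tsum i m xs + Tsum (i + xs.length) m ys := by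
  induction xs with
  | nil => intro i; simp [Tsum]
  | cons x xs ih =>
    intro i
    simp only [List.cons_append, Tsum, ih (i + 1), List.length_cons]
    have : i + 1 + xs.length = i + (xs.length + 1) := by omega
    rw [this, add_assoc]

theorem Tsum_add12 (m : Nat) (s : List Int) : ∀ i, Tsum (i + 12) m s = Tsum i m s := by
  induction s with
  | nil => intro i; rfl
  | cons c cs ih =>
    intro i
    show (if (i + 12) % 12 = m then c else 0) + Tsum (i + 12 + 1) m cs
        = (if i % 12 = m then c else 0) + Tsum (i + 1) m cs
    have h12 : (i + 12) % 12 = i % 12 := Nat.add_mod_right i 12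
    rw [h12]
    have := ih (i + 1)
    have h' : i + 12 + 1 = i + 1 + 12 := by omega
    rw [h', this]

theorem Tsum_small (c : List Int) : ∀ (i m : Nat), c.length + i ≤ 12 → m < 12 →
    Tsum i m c = if i ≤ m then c.getD (m - i) 0 else 0 := by
  induction c with
  | nil => intro i m _ _; simp [Tsum]
  | cons x cs ih =>
    intro i m hlen hm
    have hi : i < 12 := by simp at hlen; omega
    have hmod : i % 12 = i := Nat.mod_eq_of_lt hi
    show (if i % 12 = m then x else 0) + Tsum (i + 1) m cs = _
    rw [hmod, ih (i + 1) m (by simp at hlen ⊢; omega) hm]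
    by_cases h : i = m
    · subst h; simp
    · by_cases h2 : i < m
      · have e1 : (i ≤ m) = True := by simp; omega
        have e2 : (i + 1 ≤ m) = True := by simp; omega
        have e3 : m - i = (m - (i + 1)) + 1 := by omega
        simp only [h, if_false, e1, e2, if_true, e3, List.getD_cons_succ, zero_add]
      · have e1 : (i ≤ m) = False := by simp; omega
        have e2 : (i + 1 ≤ m) = False := by simp; omega
        simp [h, e1, e2]

-- stepping by one 12-chunk
theorem Tsum_chunk (s : List Int) (m : Nat) (hm : m < 12) :
    Tsum 0 m s = (s.take 12).getD m 0 + Tsum 0 m (s.drop 12) := by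
  have happ := Tsum_append m (s.take 12) (s.drop 12) 0
  rw [List.take_append_drop] at happ
  rw [happ]
  have hsmall := Tsum_small (s.take 12) 0 m (by simp) hm
  simp at hsmall
  rw [hsmall]
  by_cases h : 12 ≤ s.length
  · have : (s.take 12).length = 12 := by simp; omega
    rw [this]
    have := Tsum_add12 m (s.drop 12) 0
    simp at this ⊢
    omega
  · have hd : s.drop 12 = [] := by
      apply List.drop_eq_nil_of_le; omega
    rw [hd]
    cases h' : (s.take 12).length <;> simp [Tsum]

-- A's scatter loop: length and pointwise characterisation
theorem scatA (s : List Int) : ∀ (acc : List Int) (i : Nat), acc.length = 12 →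
    (s.foldl (fun (st : List Int × Nat) count =>
        let month_value := st.2 % 12
        (st.1.set month_value (st.1.getD month_value 0 + count), st.2 + 1)) (acc, i)).1.length = 12 ∧
    ∀ m, m < 12 →
      (s.foldl (fun (st : List Int × Nat) count =>
          let month_value := st.2 % 12
          (st.1.set month_value (st.1.getD month_value 0 + count), st.2 + 1)) (acc, i)).1.getD m 0
        = acc.getD m 0 + Tsum i m s := by
  induction s with
  | nil => intro acc i h; exact ⟨h, fun m _ => by simp [Tsum]⟩
  | cons c cs ih =>
    intro acc i h
    have hlen' : (acc.set (i % 12) (acc.getD (i % 12) 0 + c)).length = 12 := by simp [h]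
    obtain ⟨h1, h2⟩ := ih (acc.set (i % 12) (acc.getD (i % 12) 0 + c)) (i + 1) hlen'
    refine ⟨h1, fun m hm => ?_⟩
    simp only [List.foldl_cons]
    rw [h2 m hm]
    show (acc.set (i % 12) (acc.getD (i % 12) 0 + c)).getD m 0 + Tsum (i + 1) m cs
        = acc.getD m 0 + ((if i % 12 = m then c else 0) + Tsum (i + 1) m cs)
    have hm12 : m < acc.length := by omega
    by_cases he : i % 12 = m
    · subst he
      rw [List.getD_eq_getElem _ _ (by simp [h]; omega), List.getElem_set_self (by omega),
          List.getD_eq_getElem _ _ hm12]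
      simp
      ring
    · rw [List.getD_eq_getElem _ _ (by simp [h]; omega), List.getElem_set_ne he (by simp [h]; omega),
          List.getD_eq_getElem _ _ hm12]
      simp [he]

theorem chunk_loop_spec (n : Nat) : ∀ (steps totals : List Int) (start : Nat),
    steps.length - start ≤ n → totals.length = 12 →
    (chunk_loop steps totals start).length = 12 ∧
    ∀ m, m < 12 →
      (chunk_loop steps totals start).getD m 0 = totals.getD m 0 + Tsum 0 m (steps.drop start) := by
  induction n with
  | zero =>
    intro steps totals start hn ht
    rw [chunk_loop]
    have hge : ¬ start < steps.length := by omega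
    rw [dif_neg hge]
    have hdrop : steps.drop start = [] := List.drop_eq_nil_of_le (by omega)
    exact ⟨ht, fun m _ => by rw [hdrop]; simp [Tsum]⟩
  | succ n ih =>
    intro steps totals start hn ht
    rw [chunk_loop]
    by_cases hlt : start < steps.length
    · rw [dif_pos hlt]
      have hchunk : PySem.List.slice steps (some (start : Int)) (some ((start : Int) + 12))
          = (steps.drop start).take 12 := by
        have := PySem.List.slice_natCast_add (xs := steps) (j := start) (n := 12)
        simpa using this
      set totals' := (List.range 12).map (fun i =>
        totals.getD i 0 + (if i < (PySem.List.slice steps (some (start : Int)) (some ((start : Int) + 12))).length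
          then (PySem.List.slice steps (some (start : Int)) (some ((start : Int) + 12))).getD i 0 else 0)) with hT
      have ht' : totals'.length = 12 := by simp [hT]
      obtain ⟨h1, h2⟩ := ih steps totals' (start + 12) (by omega) ht'
      refine ⟨h1, fun m hm => ?_⟩
      rw [h2 m hm]
      have hgetT : totals'.getD m 0
          = totals.getD m 0 + (if m < ((steps.drop start).take 12).length
              then ((steps.drop start).take 12).getD m 0 else 0) := by
        rw [hT, List.getD_eq_getElem _ _ (by simpa using hm)]
        simp [hchunk]
      rw [hgetT]
      have hdd : steps.drop (start + 12) = (steps.drop start).drop 12 := by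
        rw [List.drop_drop]
      rw [hdd, Tsum_chunk (steps.drop start) m hm]
      have hcongr : (if m < ((steps.drop start).take 12).length
          then ((steps.drop start).take 12).getD m 0 else 0) = ((steps.drop start).take 12).getD m 0 := by
        by_cases hc : m < ((steps.drop start).take 12).length
        · rw [if_pos hc]
        · rw [if_neg hc]
          have : ((steps.drop start).take 12).getD m 0 = 0 := by
            apply List.getD_eq_default; omega
          rw [this]
      rw [hcongr]
      ring
    · rw [dif_neg hlt]
      have hdrop : steps.drop start = [] := List.drop_eq_nil_of_le (by omega)
      exact ⟨ht, fun m _ => by rw [hdrop]; simp [Tsum]⟩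

-- evaluating A's second loop on a length-12 list
theorem final_loop (t : List Int) (h : t.length = 12) :
    (List.range 12).foldl
      (fun acc i => acc.set i (PySem.Int.floordiv (acc.getD i 0)
        (([31, 28, 31, 30, 31, 30, 31, 31, 30, 31, 30, 31] : List Int).getD i 0))) t
    = List.zipWith (fun a b => PySem.Int.floordiv a b) t
        ([31, 28, 31, 30, 31, 30, 31, 31, 30, 31, 30, 31] : List Int) := by
  match t, h with
  | [a0,a1,a2,a3,a4,a5,a6,a7,a8,a9,a10,a11], _ => rfl

-- ===== VERDICT (by name: the statement is the Claim_ definition above) =====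
theorem calculate_avg_steps_spec : Claim_equal_calculate_avg_steps := by
  intro steps _
  unfold Spec_calculate_avg_steps
  show (List.range 12).foldl
      (fun acc i => acc.set i (PySem.Int.floordiv (acc.getD i 0)
        (([31, 28, 31, 30, 31, 30, 31, 31, 30, 31, 30, 31] : List Int).getD i 0)))
      (steps.foldl (fun (st : List Int × Nat) count =>
          let month_value := st.2 % 12
          (st.1.set month_value (st.1.getD month_value 0 + count), st.2 + 1))
        (List.replicate 12 (0 : Int), 0)).1
    = List.zipWith (fun t d => PySem.Int.floordiv t d)
        (chunk_loop steps (List.replicate 12 (0 : Int)) 0)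
        ([31, 28, 31, 30, 31, 30, 31, 31, 30, 31, 30, 31] : List Int)
  obtain ⟨hl, hp⟩ := scatA steps (List.replicate 12 (0 : Int)) 0 (by simp)
  obtain ⟨hl', hp'⟩ := chunk_loop_spec steps.length steps (List.replicate 12 (0 : Int)) 0 (by omega) (by simp)
  have heq : (steps.foldl (fun (st : List Int × Nat) count =>
      let month_value := st.2 % 12
      (st.1.set month_value (st.1.getD month_value 0 + count), st.2 + 1))
      (List.replicate 12 (0 : Int), 0)).1 = chunk_loop steps (List.replicate 12 (0 : Int)) 0 := by
    apply List.ext_getElem (by rw [hl, hl'])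
    intro m hm1 hm2
    have hm : m < 12 := by omega
    rw [← List.getD_eq_getElem _ 0 hm1, ← List.getD_eq_getElem _ 0 hm2,
        hp m hm, hp' m hm, List.getD_replicate _ hm]
    simp
  rw [heq, final_loop _ hl']
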